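-- pv_equiv track=rewrite | github.com/Akash-dev03/Akash | program_4.py | count_divisibles
-- ===== SOURCE A (Python) =====
-- def count_divisibles(numbers, max_divisor=9):
--     """
--     Count how many numbers in the list are divisible by each number from 1 to max_divisor.
--
--     Parameters:
--         numbers (list): List of integers to check.
--         max_divisor (int): Maximum divisor to check against (inclusive).
--
--     Returns:
--         dict: A dictionary with divisors as keys and counts as values.
--     """
--     if not numbers:
--         raise ValueError("Input list is empty.")
--
--     if not all(isinstance(num, int) for num in numbers):
--         raise ValueError("All elements in the list must be integers.")
--
--     if not isinstance(max_divisor, int) or max_divisor < 1: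
--         raise ValueError("max_divisor must be a positive integer greater than or equal to 1.")
--
--     result = {}
--     for i in range(1, max_divisor + 1):
--         result[i] = sum(1 for num in numbers if num % i == 0)
--
--     return result
-- ===== SOURCE B (Python) =====
-- def count_divisibles(numbers, max_divisor=9):
--     if not numbers:
--         raise ValueError("Input list is empty.")
--
--     if not all(isinstance(num, int) for num in numbers):
--         raise ValueError("All elements in the list must be integers.")
--
--     if not isinstance(max_divisor, int) or max_divisor < 1:
--         raise ValueError("max_divisor must be a positive integer greater than or equal to 1.")
--
--     def go(nums):
--         # divide and conquer: count vector (index i-1 = count for divisor i) for this chunk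
--         if len(nums) == 1:
--             num = nums[0]
--             return [1 if num % i == 0 else 0 for i in range(1, max_divisor + 1)]
--         mid = len(nums) // 2
--         left = go(nums[:mid])
--         right = go(nums[mid:])
--         return [a + b for a, b in zip(left, right)]
--
--     counts = go(numbers)
--     return {i + 1: c for i, c in enumerate(counts)}
-- ===== Notes on version B (the rewrite author's own statement) =====
-- stated objective: alternative
-- what changed: A fills the dict with one independent comprehension scan of numbers per divisor; B is a divide-and-conquer recursion that splits numbers in halves, computes a per-divisor count vector for each half and merges them by pointwise addition, building the dict from the final vector.
import Mathlib
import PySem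

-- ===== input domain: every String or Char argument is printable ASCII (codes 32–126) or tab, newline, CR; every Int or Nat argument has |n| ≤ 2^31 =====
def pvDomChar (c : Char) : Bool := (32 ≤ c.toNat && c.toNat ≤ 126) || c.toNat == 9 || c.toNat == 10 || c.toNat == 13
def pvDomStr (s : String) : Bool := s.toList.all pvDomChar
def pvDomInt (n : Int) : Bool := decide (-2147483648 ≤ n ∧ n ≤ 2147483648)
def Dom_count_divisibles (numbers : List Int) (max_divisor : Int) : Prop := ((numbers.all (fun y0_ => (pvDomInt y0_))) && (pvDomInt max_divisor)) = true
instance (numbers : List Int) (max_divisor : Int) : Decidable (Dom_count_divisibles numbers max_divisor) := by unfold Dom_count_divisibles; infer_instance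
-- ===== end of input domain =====

-- B replaces A's per-divisor comprehension scans by a divide-and-conquer recursion that splits
-- `numbers` in halves and merges per-divisor count vectors pointwise (objective: alternative).

-- ===== PORT A =====
-- result = {}; for i in range(1, max+1): result[i] = sum(1 for num in numbers if num % i == 0)
def count_divisibles (numbers : List Int) (max_divisor : Int) : List (Int × Int) :=
  ((PySem.List.pyRange 1 (max_divisor + 1) 1).foldl
      (fun res i =>
        res.insert i (numbers.foldl (fun s num => if PySem.Int.mod num i = 0 then s + 1 else s) 0))
      PySem.Dict.empty).items

-- ===== PORT B =====
-- def go(nums): len==1 -> [1 if num % i == 0 else 0 for i in range(1, d+1)];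
--               else merge go(nums[:mid]) and go(nums[mid:]) by pointwise addition (zip)
-- (go is never reached with an empty chunk in Python; the [] branch here is unreachable under Pre_)
def pvGoB (d : Int) : List Int → List Int
  | [] => []
  | [num] => (PySem.List.pyRange 1 (d + 1) 1).map (fun i => if PySem.Int.mod num i = 0 then 1 else 0)
  | x :: y :: rest =>
      let mid := (x :: y :: rest).length / 2
      List.zipWith (· + ·) (pvGoB d ((x :: y :: rest).take mid))
        (pvGoB d ((x :: y :: rest).drop mid))
  termination_by nums => nums.length
  decreasing_by
  · simp [List.length_take]; omega
  · simp; omega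

-- counts = go(numbers); return {i+1: c for i, c in enumerate(counts)}
def count_divisibles_alt (numbers : List Int) (max_divisor : Int) : List (Int × Int) :=
  (PySem.List.enumerate (pvGoB max_divisor numbers) 0).map (fun p => (p.1 + 1, p.2))

-- ===== PRECONDITION & SPEC =====
-- A (and B) raise ValueError on an empty list and on max_divisor < 1; Pre_ excludes exactly those.
def Pre_count_divisibles (numbers : List Int) (max_divisor : Int) : Prop :=
  numbers ≠ [] ∧ 1 ≤ max_divisor
instance (numbers : List Int) (max_divisor : Int) : Decidable (Pre_count_divisibles numbers max_divisor) := by unfold Pre_count_divisibles; infer_instance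
def pvWitness_count_divisibles : List Int × Int := ([6, -4, 9], 4)

def Spec_count_divisibles (numbers : List Int) (max_divisor : Int) (out : List (Int × Int)) : Prop := out = count_divisibles_alt numbers max_divisor
instance (numbers : List Int) (max_divisor : Int) (out : List (Int × Int)) : Decidable (Spec_count_divisibles numbers max_divisor out) := by unfold Spec_count_divisibles; infer_instance

-- ===== CLAIM (what is proved, stated in full; the proofs are below) =====
def Claim_equal_count_divisibles : Prop := ∀ (numbers : List Int) (max_divisor : Int), Dom_count_divisibles numbers max_divisor → Pre_count_divisibles numbers max_divisor → Spec_count_divisibles numbers max_divisor (count_divisibles numbers max_divisor)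

-- ===== LEMMAS AND PROOFS =====

-- the count both programs compute for divisor i
def pvCnt (numbers : List Int) (i : Int) : Int :=
  (numbers.countP (fun num => PySem.Int.mod num i = 0) : Int)

-- A's result is the divisors paired with their counts, in range order
lemma A_items (numbers : List Int) (m : Int) :
    count_divisibles numbers m
      = (PySem.List.pyRange 1 (m + 1) 1).map (fun i => (i, pvCnt numbers i)) := by
  unfold count_divisibles
  rw [PySem.Dict.items_foldl_insert_fresh (PySem.List.pyRange 1 (m + 1) 1) (fun i => i)
        (fun i => numbers.foldl (fun s num => if PySem.Int.mod num i = 0 then s + 1 else s) 0)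
        PySem.Dict.empty
        (fun a _ => PySem.Dict.contains_empty a)
        (by simpa using PySem.List.nodup_pyRange_one 1 (m + 1))]
  simp only [show (PySem.Dict.empty : PySem.Dict Int Int).items = [] from rfl, List.nil_append]
  refine List.map_congr_left (fun i _ => ?_)
  have := PySem.List.foldl_count_if (fun num => decide (PySem.Int.mod num i = 0)) numbers 0
  simp only [decide_eq_true_eq] at this
  simp [pvCnt, this]

-- pointwise addition of two tabulations of the same list is the tabulation of the sum
lemma zipWith_map_same (f g : Int → Int) (l : List Int) :
    List.zipWith (· + ·) (l.map f) (l.map g) = l.map (fun i => f i + g i) := by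
  induction l with
  | nil => rfl
  | cons x xs ih => simp [ih]

-- counts add across a split of the chunk
lemma pvCnt_append (xs ys : List Int) (i : Int) :
    pvCnt (xs ++ ys) i = pvCnt xs i + pvCnt ys i := by
  simp [pvCnt, List.countP_append]

-- B's divide-and-conquer produces the per-divisor count vector of its chunk
lemma goB_spec (d : Int) : ∀ (nums : List Int), nums ≠ [] →
    pvGoB d nums = (PySem.List.pyRange 1 (d + 1) 1).map (fun i => pvCnt nums i) := by
  intro nums
  induction nums using pvGoB.induct with
  | case1 => intro h; exact absurd rfl h
  | case2 num =>
    intro _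
    simp [pvGoB, pvCnt, List.countP_cons]
  | case3 x y rest mid ihl ihr =>
    intro _
    have hmid : mid = (x :: y :: rest).length / 2 := rfl
    have hlen : (x :: y :: rest).length = rest.length + 2 := by simp
    have htake : (x :: y :: rest).take mid ≠ [] := by
      apply List.ne_nil_of_length_pos
      rw [List.length_take, hmid, hlen]
      omega
    have hdrop : (x :: y :: rest).drop mid ≠ [] := by
      apply List.ne_nil_of_length_pos
      rw [List.length_drop, hmid, hlen]
      omega
    rw [pvGoB, ihl htake, ihr hdrop, zipWith_map_same]
    refine List.map_congr_left (fun i _ => ?_)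
    rw [← pvCnt_append, List.take_append_drop]

-- ===== VERDICT (by name: the statement is the Claim_ definition above) =====
theorem count_divisibles_spec : Claim_equal_count_divisibles := by
  intro numbers m _ hpre
  obtain ⟨hne, hm⟩ := hpre
  unfold Spec_count_divisibles count_divisibles_alt
  rw [A_items, goB_spec m numbers hne]
  apply List.ext_getElem
  · simp [PySem.List.length_pyRange_one, PySem.List.length_enumerate]
  · intro k h1 h2
    simp only [List.getElem_map, PySem.List.getElem_pyRange_one,
      PySem.List.getElem_enumerate]
    rw [show (0 : Int) + (k : Int) + 1 = 1 + (k : Int) from by ring]
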